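-- pv_equiv track=rewrite | github.com/Dexy2811/Advent-of-code | 2024/AOC day 1/AOC-D1-C2.py | comp_sim
-- ===== SOURCE A (Python) =====
-- def comp_sim(a,b):
--     numbers=[]
--
--
--
--     for k in a:
--         for l in b:
--             if k[0]==l[0]:
--                 num=k[0]*l[1]
--                 numbers.append(num)
--
--
--     total=sum(numbers)
--     return total
-- ===== SOURCE B (Python) =====
-- def comp_sim(a, b):
--     sums = {}
--     for key, val in b:
--         sums[key] = sums.get(key, 0) + val
--     return sum(k * sums.get(k, 0) for k, _ in a)
-- ===== Notes on version B (the rewrite author's own statement) =====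
-- stated objective: faster
-- what changed: Replaces the nested O(n*m) scan with a single pass over b building a hash map key -> sum of values, then one pass over a multiplying each key by its summed match.
import Mathlib
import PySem

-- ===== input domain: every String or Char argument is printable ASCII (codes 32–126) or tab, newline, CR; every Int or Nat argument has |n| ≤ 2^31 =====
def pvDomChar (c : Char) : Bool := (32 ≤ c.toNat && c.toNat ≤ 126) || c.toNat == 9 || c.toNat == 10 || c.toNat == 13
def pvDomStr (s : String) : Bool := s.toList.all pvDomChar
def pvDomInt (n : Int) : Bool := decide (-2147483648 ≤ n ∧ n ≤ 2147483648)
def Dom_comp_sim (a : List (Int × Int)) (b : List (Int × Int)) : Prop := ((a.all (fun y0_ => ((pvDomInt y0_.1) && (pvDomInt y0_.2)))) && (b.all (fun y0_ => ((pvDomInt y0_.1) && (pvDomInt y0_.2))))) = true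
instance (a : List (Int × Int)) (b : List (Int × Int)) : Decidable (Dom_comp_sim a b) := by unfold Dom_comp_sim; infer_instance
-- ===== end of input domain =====

-- B replaces A's nested O(n*m) scan with a dict of summed values per key and one pass over a (faster, asymptotic).


-- ===== PORT A =====
def comp_sim (a : List (Int × Int)) (b : List (Int × Int)) : Int :=
  let numbers : List Int :=
    a.foldl (fun numbers k =>
      b.foldl (fun numbers l =>
        if k.1 == l.1 then numbers ++ [k.1 * l.2] else numbers) numbers) []
  numbers.sum

-- ===== PORT B =====
def comp_sim_sums (b : List (Int × Int)) : PySem.Dict Int Int :=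
  b.foldl (fun d l => d.insert l.1 (d.getD l.1 0 + l.2)) PySem.Dict.empty

def comp_sim_alt (a : List (Int × Int)) (b : List (Int × Int)) : Int :=
  let sums := comp_sim_sums b
  (a.map (fun k => k.1 * sums.getD k.1 0)).sum

-- ===== PRECONDITION & SPEC =====
def Spec_comp_sim (a : List (Int × Int)) (b : List (Int × Int)) (out : Int) : Prop := out = comp_sim_alt a b
instance (a : List (Int × Int)) (b : List (Int × Int)) (out : Int) : Decidable (Spec_comp_sim a b out) := by unfold Spec_comp_sim; infer_instance

-- ===== CLAIM (what is proved, stated in full; the proofs are below) =====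
def Claim_equal_comp_sim : Prop := ∀ (a : List (Int × Int)) (b : List (Int × Int)), Dom_comp_sim a b → Spec_comp_sim a b (comp_sim a b)

-- ===== LEMMAS AND PROOFS =====

/-- Sum of the values of `b` at key `x`. -/
def gsum (b : List (Int × Int)) (x : Int) : Int :=
  (b.map (fun l => if l.1 = x then l.2 else 0)).sum

theorem pv_inner_sum (k : Int × Int) (b : List (Int × Int)) (ns : List Int) :
    (b.foldl (fun numbers l =>
        if k.1 == l.1 then numbers ++ [k.1 * l.2] else numbers) ns).sum
      = ns.sum + k.1 * gsum b k.1 := by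
  induction b generalizing ns with
  | nil => simp [gsum]
  | cons l t ih =>
    simp only [List.foldl_cons, ih, gsum, List.map_cons, List.sum_cons]
    by_cases h : k.1 = l.1
    · simp [h, mul_add]; ring
    · simp [h, Ne.symm h]

theorem sums_getD (b : List (Int × Int)) (d : PySem.Dict Int Int) (x : Int) :
    (b.foldl (fun d l => d.insert l.1 (d.getD l.1 0 + l.2)) d).getD x 0
      = d.getD x 0 + gsum b x := by
  induction b generalizing d with
  | nil => simp [gsum]
  | cons l t ih =>
    simp only [List.foldl_cons, ih, gsum, List.map_cons, List.sum_cons,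
      PySem.Dict.getD_insert]
    by_cases h : x = l.1
    · simp [h]; ring
    · have hz : ((if l.1 = x then l.2 else 0) : Int) = 0 := if_neg (fun h' => h h'.symm)
      simp [h, hz]

theorem outer_sum (b : List (Int × Int)) (a : List (Int × Int)) (ns : List Int) :
    (a.foldl (fun numbers k =>
        b.foldl (fun numbers l =>
          if k.1 == l.1 then numbers ++ [k.1 * l.2] else numbers) numbers) ns).sum
      = ns.sum + (a.map (fun k => k.1 * gsum b k.1)).sum := by
  induction a generalizing ns with
  | nil => simp
  | cons k t ih =>
    simp only [List.foldl_cons]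
    rw [ih, pv_inner_sum]
    simp [List.map_cons]; ring

-- ===== VERDICT (by name: the statement is the Claim_ definition above) =====
theorem comp_sim_spec : Claim_equal_comp_sim := by
  intro a b _
  unfold Spec_comp_sim comp_sim comp_sim_alt comp_sim_sums
  simp only [outer_sum, List.sum_nil, zero_add, sums_getD]
  simp [PySem.Dict.getD]
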